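-- pv_equiv track=rewrite | github.com/6puritans9/Algorithms | Boj/Gold/math/27172.py | result_after_game
-- ===== SOURCE A (Python) =====
-- def result_after_game(n: int, cards: tuple[int, ...]) -> list[int]:
--     # TC = O(N + N*log(max_card)) = O(Nlog(max_card) == O(10^5 * 6log10) = O(10^5)
--     # SC = O(N)
--
--     scores = [0 for _ in range(n)]
--     max_card = max(cards)
--     card_idx_map = {card: idx for idx, card in enumerate(cards)}  # O(N)
--
--     for i, card in enumerate(cards):  # O(N)
--         multiple = card * 2
--         while multiple <= max_card:  # O(log(max_card))
--             if multiple in card_idx_map: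
--                 scores[i] += 1
--                 scores[card_idx_map[multiple]] -= 1
--             multiple += card
--
--     return scores
-- ===== SOURCE B (Python) =====
-- def result_after_game(n: int, cards: tuple[int, ...]) -> list[int]:
--     # Pairwise scoring: for each pair of cards showing different numbers, a card that
--     # divides the other gains a point and the divided card loses one.
--     scores = [0] * n
--     m = len(cards)
--     for i in range(m):
--         for j in range(m):
--             if cards[i] != cards[j] and cards[j] % cards[i] == 0:
--                 scores[i] += 1
--                 scores[j] -= 1
--     return scores
-- ===== Notes on version B (the rewrite author's own statement) =====
-- stated objective: simpler
-- what changed: B drops A's max/dict/multiple-stepping sieve and scores by a direct double loop over index pairs, testing divisibility per pair; Pre_ excludes lists holding a duplicated card value that is a proper multiple of another card, where A's dict-comprehension accidentally scores the duplicated value once and charges its penalty only to its last occurrence.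
-- outside the precondition, e.g. on result_after_game(3, (2, 4, 4)): A returns [1, 0, -1], B returns [2, -1, -1]
import Mathlib
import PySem

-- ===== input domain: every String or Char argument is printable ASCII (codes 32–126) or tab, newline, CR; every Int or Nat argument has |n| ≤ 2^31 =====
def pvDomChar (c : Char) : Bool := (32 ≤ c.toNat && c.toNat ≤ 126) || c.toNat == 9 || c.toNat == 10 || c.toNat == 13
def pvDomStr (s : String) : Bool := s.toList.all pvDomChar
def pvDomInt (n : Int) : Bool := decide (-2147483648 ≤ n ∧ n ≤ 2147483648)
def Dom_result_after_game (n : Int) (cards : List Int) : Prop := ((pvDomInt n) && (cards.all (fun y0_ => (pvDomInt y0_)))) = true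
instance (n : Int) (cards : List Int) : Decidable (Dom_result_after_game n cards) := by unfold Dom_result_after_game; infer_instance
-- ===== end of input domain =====

-- B replaces A's max/dict/multiple-stepping sieve by a direct double loop over index
-- pairs testing divisibility; objective: simpler (not faster). Pre_ excludes lists with
-- duplicate card values, on which A's dict-comprehension attribution is accidental.


-- ===== PORT A =====
-- scores[x] += d  (in-place add; Python raises when x is out of range — Pre_ excludes that,
-- here the out-of-range case is a no-op to stay total)
def pvAddAt (s : List Int) (x d : Int) : List Int :=
  PySem.List.pySetD s x (PySem.List.pyGetD s x 0 + d)

def result_after_game (n : Int) (cards : List Int) : List Int :=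
  let scores : List Int := (PySem.List.pyRange 0 n 1).map (fun _ => (0 : Int))
  let maxCard : Int := ((PySem.List.max? cards (fun x => x)).getD 0)  -- max(cards); Python raises on [], Pre_ excludes
  let cardIdxMap : PySem.Dict Int Int :=
    (PySem.List.enumerate cards).foldl (fun d p => d.insert p.2 p.1) PySem.Dict.empty
  (PySem.List.enumerate cards).foldl (fun scores p =>
    -- while multiple <= max_card: … ; multiple += card  — the visited multiples are
    -- range(2*card, max_card+1, card); for card ≤ 0 the Python loop diverges (Pre_ excludes)
    (PySem.List.pyRange (2 * p.2) (maxCard + 1) p.2).foldl (fun scores multiple =>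
      match cardIdxMap.get? multiple with
      | some j => pvAddAt (pvAddAt scores p.1 1) j (-1)
      | none => scores) scores) scores

-- ===== PORT B =====
def result_after_game_alt (n : Int) (cards : List Int) : List Int :=
  let scores : List Int := List.replicate n.toNat 0   -- [0] * n
  let m : Int := PySem.List.len cards
  (PySem.List.pyRange 0 m 1).foldl (fun scores i =>
    (PySem.List.pyRange 0 m 1).foldl (fun scores j =>
      if PySem.List.pyGetD cards i 0 ≠ PySem.List.pyGetD cards j 0 ∧
          PySem.Int.mod (PySem.List.pyGetD cards j 0) (PySem.List.pyGetD cards i 0) = 0 then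
        pvAddAt (pvAddAt scores i 1) j (-1)
      else scores) scores) scores

-- ===== PRECONDITION & SPEC =====
-- Pre_ excludes lists holding a duplicated card value that is a proper multiple of some
-- other card in hand: there A's dict-comprehension accidentally scores the duplicated
-- value once and charges its penalty only to its last occurrence; further Pre_ admits
-- only the inputs on which A returns: cards nonempty (max(()) raises ValueError), all
-- cards positive (a card ≤ 0 makes A's while loop diverge), and every divisor/multiple
-- score update landing at an index < n (else A raises IndexError).
def Pre_result_after_game (n : Int) (cards : List Int) : Prop :=
  cards ≠ [] ∧ (∀ c ∈ cards, 0 < c) ∧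
  (∀ v ∈ cards, 1 < cards.count v → ∀ o ∈ cards, o = v ∨ ¬ PySem.Int.mod v o = 0) ∧
  ∀ i < cards.length, ∀ j < cards.length, cards.getD i 0 ≠ cards.getD j 0 →
    PySem.Int.mod (cards.getD j 0) (cards.getD i 0) = 0 →
    (i : Int) < n ∧ (j : Int) < n
instance (n : Int) (cards : List Int) : Decidable (Pre_result_after_game n cards) := by
  unfold Pre_result_after_game; infer_instance

def pvWitness_result_after_game : Int × List Int := (4, [2, 3, 6, 5])

def Spec_result_after_game (n : Int) (cards : List Int) (out : List Int) : Prop := out = result_after_game_alt n cards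
instance (n : Int) (cards : List Int) (out : List Int) : Decidable (Spec_result_after_game n cards out) := by unfold Spec_result_after_game; infer_instance

-- ===== CLAIM (what is proved, stated in full; the proofs are below) =====
def Claim_equal_result_after_game : Prop := ∀ (n : Int) (cards : List Int), Dom_result_after_game n cards → Pre_result_after_game n cards → Spec_result_after_game n cards (result_after_game n cards)


-- ===== LEMMAS AND PROOFS =====

def pvStep (s : List Int) (q : Int × Int) : List Int := pvAddAt s q.1 q.2

def pvDict (cards : List Int) : PySem.Dict Int Int :=
  (PySem.List.enumerate cards).foldl (fun d p => d.insert p.2 p.1) PySem.Dict.empty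

def pvOpsOf (d : PySem.Dict Int Int) (i m : Int) : List (Int × Int) :=
  match d.get? m with
  | some j => [(i, 1), (j, -1)]
  | none => []

def pvRangeOf (M c : Int) : List Int := PySem.List.pyRange (2 * c) (M + 1) c

lemma pvA_eq_opsfold (n : Int) (cards : List Int) :
    result_after_game n cards =
      ((PySem.List.enumerate cards).flatMap (fun p =>
          (pvRangeOf ((PySem.List.max? cards (fun x => x)).getD 0) p.2).flatMap
            (pvOpsOf (pvDict cards) p.1))).foldl pvStep
        ((PySem.List.pyRange 0 n 1).map (fun _ => (0 : Int))) := by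
  rw [List.foldl_flatMap]
  show _ = List.foldl (fun acc p => List.foldl pvStep acc (List.flatMap _ _)) _ _
  simp only [result_after_game]
  apply PySem.List.foldl_congr_mem
  intro acc p _
  rw [List.foldl_flatMap]
  apply PySem.List.foldl_congr_mem
  intro sc m _
  have hfold : List.foldl (fun (d : PySem.Dict Int Int) (p : Int × Int) => d.insert p.2 p.1)
      PySem.Dict.empty (PySem.List.enumerate cards) = pvDict cards := rfl
  rw [hfold]
  simp only [pvOpsOf]
  cases h : (pvDict cards).get? m with
  | some j => simp [pvStep]
  | none => simp [pvStep]

lemma pvLength_opsfold (ops : List (Int × Int)) (sc : List Int) :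
    (ops.foldl pvStep sc).length = sc.length := by
  induction ops generalizing sc with
  | nil => rfl
  | cons q t ih =>
    rw [List.foldl_cons, ih]
    simp [pvStep, pvAddAt, PySem.List.length_pySetD]

lemma pvGetD_pvAddAt (sc : List Int) (x d : Int) (k : Nat) (hx : 0 ≤ x)
    (hxl : x.toNat < sc.length) :
    (pvAddAt sc x d).getD k 0 = sc.getD k 0 + if x = (k : Int) then d else 0 := by
  rw [pvAddAt, PySem.List.pySetD_of_nonneg _ _ hx, PySem.List.pyGetD_of_nonneg _ _ hx]
  by_cases hk : x.toNat = k
  · subst hk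
    rw [if_pos (by omega)]
    simp [List.getD_eq_getElem?_getD, List.getElem?_set, hxl]
  · rw [if_neg (by omega)]
    simp [List.getD_eq_getElem?_getD, List.getElem?_set, hk]

lemma pvGetD_opsfold (ops : List (Int × Int)) (sc : List Int) (k : Nat)
    (h : ∀ q ∈ ops, 0 ≤ q.1 ∧ q.1.toNat < sc.length) :
    (ops.foldl pvStep sc).getD k 0
      = sc.getD k 0 + (ops.map (fun q => if q.1 = (k : Int) then q.2 else 0)).sum := by
  induction ops generalizing sc with
  | nil => simp
  | cons q t ih =>
    obtain ⟨hq0, hql⟩ := h q (List.mem_cons_self ..)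
    have hlen : (pvStep sc q).length = sc.length := by
      simp [pvStep, pvAddAt, PySem.List.length_pySetD]
    rw [List.foldl_cons, ih (pvStep sc q) (fun r hr =>
      ⟨(h r (List.mem_cons_of_mem _ hr)).1, by
        rw [hlen]; exact (h r (List.mem_cons_of_mem _ hr)).2⟩)]
    show (pvAddAt sc q.1 q.2).getD k 0 + _ = _
    rw [pvGetD_pvAddAt sc q.1 q.2 k hq0 hql]
    simp [List.map_cons]; ring

lemma pvMem_rangeOf (M c m : Int) (hc : 0 < c) :
    m ∈ pvRangeOf M c ↔ 2 * c ≤ m ∧ m ≤ M ∧ c ∣ m := by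
  rw [pvRangeOf, PySem.List.mem_pyRange_iff_of_pos hc]
  constructor
  · rintro ⟨h1, h2, q, hq⟩
    exact ⟨h1, by omega, ⟨q + 2, by linear_combination hq⟩⟩
  · rintro ⟨h1, h2, q, hq⟩
    exact ⟨h1, by omega, ⟨q - 2, by linear_combination hq⟩⟩

lemma pvNodup_rangeOf (M c : Int) (hc : 0 < c) : (pvRangeOf M c).Nodup := by
  rw [pvRangeOf, PySem.List.pyRange_of_pos _ _ hc]
  refine (List.nodup_range).map ?_
  intro a b hab
  simp only at hab
  have h2 : c * (a : Int) = c * (b : Int) := by linarith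
  have h3 := mul_left_cancel₀ (ne_of_gt hc) h2
  omega

lemma pvWindow (cards : List Int) (hpos : ∀ x ∈ cards, 0 < x) (M : Int)
    (hM : ∀ y ∈ cards, y ≤ M) (c x : Int) (hc : c ∈ cards) (hx : x ∈ cards) :
    (2 * c ≤ x ∧ x ≤ M ∧ c ∣ x) ↔ (x ≠ c ∧ c ∣ x) := by
  have hc0 := hpos c hc
  have hx0 := hpos x hx
  constructor
  · rintro ⟨h1, _, hd⟩
    exact ⟨by omega, hd⟩
  · rintro ⟨hne, q, hq⟩
    refine ⟨?_, hM x hx, ⟨q, hq⟩⟩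
    have hq1 : 0 < q := by
      by_contra hh
      push_neg at hh
      nlinarith
    have hq2 : q ≠ 1 := fun h => hne (by rw [hq, h, mul_one])
    have hq3 : 2 ≤ q := by omega
    nlinarith [mul_le_mul_of_nonneg_left hq3 hc0.le]

lemma pvSum_flatMap {α : Type} (l : List α) (f : α → List Int) :
    (l.flatMap f).sum = (l.map (fun x => (f x).sum)).sum := by
  induction l with
  | nil => simp
  | cons x t ih => simp [List.flatMap_cons, ih]

lemma pvSum_map_neg {α : Type} (l : List α) (h : α → Int) :
    (l.map (fun x => -(h x))).sum = -((l.map h).sum) := by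
  induction l with
  | nil => simp
  | cons x t ih => simp [ih]; ring

lemma pvSum_ite_prop {α : Type} (P : α → Prop) [DecidablePred P] (xs : List α) :
    (xs.map (fun x => if P x then (1 : Int) else 0)).sum
      = (xs.countP (fun x => decide (P x)) : Int) := by
  rw [← PySem.List.sum_map_ite_one_zero (fun x => decide (P x)) xs]
  congr 1
  apply List.map_congr_left
  intro x _
  by_cases h : P x <;> simp [h]

lemma pvMap_snd (G : Int → Int) (xs : List Int) (s : Int) :
    (PySem.List.enumerate xs s).map (fun p => G p.2) = xs.map G := by
  have h : (fun (p : Int × Int) => G p.2) = G ∘ (fun (p : Int × Int) => p.2) := rfl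
  rw [h, ← List.map_map, PySem.List.map_snd_enumerate]

lemma pvOpsOf_mem (d : PySem.Dict Int Int) (i m : Int) (q : Int × Int)
    (hq : q ∈ pvOpsOf d i m) :
    q = (i, 1) ∨ ∃ j, d.get? m = some j ∧ q = (j, -1) := by
  unfold pvOpsOf at hq
  cases h : d.get? m with
  | some j =>
    rw [h] at hq
    simp only [List.mem_cons, List.mem_singleton, List.not_mem_nil, or_false] at hq
    rcases hq with h1 | h1
    · exact Or.inl h1
    · exact Or.inr ⟨j, rfl, h1⟩
  | none =>
    rw [h] at hq
    simp at hq

lemma pvOpsOf_sum (d : PySem.Dict Int Int) (i m : Int) (k : Nat) :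
    ((pvOpsOf d i m).map (fun q => if q.1 = (k : Int) then q.2 else 0)).sum
      = (if i = (k : Int) then (if (d.get? m).isSome = true then (1 : Int) else 0) else 0)
        + (-(if (d.get? m == some (k : Int)) = true then (1 : Int) else 0)) := by
  cases h : d.get? m with
  | some j =>
    simp only [pvOpsOf, h, Option.isSome_some, beq_iff_eq, Option.some.injEq]
    by_cases hik : i = (k : Int) <;> by_cases hjk : j = (k : Int) <;>
      simp [hik, hjk]
  | none =>
    simp [pvOpsOf, h]

lemma pvSum_enum_indicator (F : Int → Int) (xs : List Int) :
    ∀ (s k : Nat),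
    ((PySem.List.enumerate xs (s : Int)).map
        (fun p => if p.1 = (k : Int) then F p.2 else 0)).sum
      = if s ≤ k ∧ k < s + xs.length then F (xs.getD (k - s) 0) else 0 := by
  induction xs with
  | nil => intro s k; simp
  | cons x t ih =>
    intro s k
    rw [PySem.List.enumerate_cons, List.map_cons, List.sum_cons]
    have hcast : ((s : Int) + 1) = ((s + 1 : Nat) : Int) := by push_cast; ring
    rw [hcast, ih (s + 1) k]
    by_cases h2 : k = s
    · subst h2
      rw [if_pos rfl, if_neg (by omega), if_pos (by simp only [List.length_cons]; omega)]
      simp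
    · rw [if_neg (by omega)]
      by_cases h1 : s + 1 ≤ k ∧ k < s + 1 + t.length
      · rw [if_pos h1, if_pos (by simp only [List.length_cons]; omega)]
        have hks : k - s = (k - (s + 1)) + 1 := by omega
        rw [hks, List.getD_cons_succ]
        ring
      · rw [if_neg h1, if_neg (by simp only [List.length_cons]; omega)]
        ring

lemma pvInner_sum (cards : List Int) (M : Int) (k : Nat) (i c : Int) :
    (((pvRangeOf M c).flatMap (pvOpsOf (pvDict cards) i)).map
        (fun q => if q.1 = (k : Int) then q.2 else 0)).sum
      = (if i = (k : Int)
          then ((pvRangeOf M c).countP (fun m => ((pvDict cards).get? m).isSome) : Int)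
          else 0)
        - ((pvRangeOf M c).countP
            (fun m => (pvDict cards).get? m == some (k : Int)) : Int) := by
  rw [List.map_flatMap]
  rw [pvSum_flatMap]
  rw [List.map_congr_left (fun m _ => pvOpsOf_sum (pvDict cards) i m k)]
  rw [PySem.List.sum_map_add_int]
  rw [sub_eq_add_neg]
  congr 1
  · by_cases hik : i = (k : Int)
    · rw [if_pos hik]
      simp only [if_pos hik]
      exact PySem.List.sum_map_ite_one_zero _ _
    · rw [if_neg hik]
      simp [hik]
  · rw [pvSum_map_neg]
    rw [PySem.List.sum_map_ite_one_zero]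

lemma pvA_length (n : Int) (cards : List Int) :
    (result_after_game n cards).length = n.toNat := by
  rw [pvA_eq_opsfold, pvLength_opsfold]
  simp [PySem.List.length_pyRange_one]

-- value-level score components: a card value c gains 1 per DISTINCT proper multiple
-- value present; the last card of value c loses 1 per properly dividing card occurrence
def pvUps (cards : List Int) (c : Int) : Nat :=
  cards.dedup.countP (fun v => decide (v ≠ c ∧ PySem.Int.mod v c = 0))

def pvDowns (cards : List Int) (c : Int) : Nat :=
  cards.countP (fun o => decide (o ≠ c ∧ PySem.Int.mod c o = 0))

-- j is the last index holding its value (A's dict maps each value to its last index)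
def pvLastOcc (cards : List Int) (j : Nat) : Prop :=
  ∀ u < cards.length, j < u → cards.getD u 0 ≠ cards.getD j 0

-- Bool form of pvLastOcc, for use under if/countP
def pvIsLast (cards : List Int) (j : Nat) : Bool :=
  decide (∀ u < cards.length, j < u → cards.getD u 0 ≠ cards.getD j 0)

lemma pvIsLast_iff (cards : List Int) (j : Nat) :
    pvIsLast cards j = true ↔ pvLastOcc cards j := by
  unfold pvIsLast pvLastOcc
  exact decide_eq_true_iff

def pvNetAt (cards : List Int) (k : Nat) : Int :=
  (pvUps cards (cards.getD k 0) : Int)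
    - (if pvIsLast cards k = true then (pvDowns cards (cards.getD k 0) : Int) else 0)

-- the dict built by A maps each value to its LAST index
lemma pvDict_snoc (xs : List Int) (x : Int) :
    pvDict (xs ++ [x]) = (pvDict xs).insert x ((xs.length : Int)) := by
  unfold pvDict
  rw [PySem.List.enumerate_append, List.foldl_append]
  simp [PySem.List.enumerate_cons, PySem.List.enumerate_nil]

lemma pvLastOcc_append_lt (xs : List Int) (x : Int) (t : Nat) (ht : t < xs.length) :
    pvLastOcc (xs ++ [x]) t ↔ (pvLastOcc xs t ∧ x ≠ xs.getD t 0) := by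
  have hgt : (xs ++ [x]).getD t 0 = xs.getD t 0 := List.getD_append _ _ _ _ ht
  constructor
  · intro h
    refine ⟨fun u hu htu => ?_, ?_⟩
    · have := h u (by simp; omega) htu
      rwa [List.getD_append _ _ _ _ hu, hgt] at this
    · have := h xs.length (by simp) ht
      rwa [List.getD_eq_getElem?_getD (l := xs ++ [x]) (i := xs.length),
        List.getElem?_concat_length, hgt] at this
  · rintro ⟨h1, h2⟩ u hu htu
    rw [hgt]
    rcases Nat.lt_or_ge u xs.length with hu' | hu'
    · rw [List.getD_append _ _ _ _ hu']
      exact h1 u hu' htu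
    · have hueq : u = xs.length := by simp at hu; omega
      subst hueq
      rw [List.getD_eq_getElem?_getD (l := xs ++ [x]) (i := xs.length), List.getElem?_concat_length]
      exact h2

lemma pvDict_get?L (cards : List Int) (v j : Int) :
    (pvDict cards).get? v = some j ↔
      ∃ t : Nat, t < cards.length ∧ j = (t : Int) ∧ cards.getD t 0 = v ∧
        pvLastOcc cards t := by
  induction cards using List.reverseRecOn with
  | nil =>
    simp [pvDict, PySem.List.enumerate_nil, PySem.Dict.get?_empty]
  | append_singleton xs x ih =>
    rw [pvDict_snoc, PySem.Dict.get?_insert]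
    have hgetlast : (xs ++ [x]).getD xs.length 0 = x := by
      rw [List.getD_eq_getElem?_getD (l := xs ++ [x]) (i := xs.length), List.getElem?_concat_length]
      rfl
    by_cases hvx : v = x
    · rw [if_pos hvx]
      constructor
      · rintro h
        refine ⟨xs.length, by simp, by simpa using h.symm, by rw [hgetlast, hvx], ?_⟩
        intro u hu htu
        simp at hu
        omega
      · rintro ⟨t, ht, rfl, hv, hlast⟩
        rcases Nat.lt_or_ge t xs.length with ht' | ht'
        · exfalso
          have := hlast xs.length (by simp) ht'
          rw [List.getD_append _ _ _ _ ht'] at hv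
          rw [hgetlast, List.getD_append _ _ _ _ ht', hv, hvx] at this
          exact this rfl
        · have : t = xs.length := by simp at ht; omega
          subst this
          rfl
    · rw [if_neg hvx, ih]
      constructor
      · rintro ⟨t, ht, rfl, hv, hlast⟩
        refine ⟨t, by simp; omega, rfl, by rw [List.getD_append _ _ _ _ ht]; exact hv, ?_⟩
        rw [pvLastOcc_append_lt xs x t ht]
        exact ⟨hlast, by rw [hv]; exact fun h => hvx h.symm⟩
      · rintro ⟨t, ht, rfl, hv, hlast⟩
        have ht' : t < xs.length := by
          rcases Nat.lt_or_ge t xs.length with h | h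
          · exact h
          · exfalso
            have : t = xs.length := by simp at ht; omega
            subst this
            rw [hgetlast] at hv
            exact hvx hv.symm
        rw [pvLastOcc_append_lt xs x t ht'] at hlast
        exact ⟨t, ht', rfl, by rw [List.getD_append _ _ _ _ ht'] at hv; exact hv, hlast.1⟩

lemma pvLast_exists (cards : List Int) (v : Int) (hv : v ∈ cards) :
    ∃ t : Nat, t < cards.length ∧ cards.getD t 0 = v ∧ pvLastOcc cards t := by
  induction cards using List.reverseRecOn with
  | nil => simp at hv
  | append_singleton xs x ih =>
    have hgetlast : (xs ++ [x]).getD xs.length 0 = x := by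
      rw [List.getD_eq_getElem?_getD (l := xs ++ [x]) (i := xs.length), List.getElem?_concat_length]
      rfl
    by_cases hvx : v = x
    · refine ⟨xs.length, by simp, by rw [hgetlast, hvx], ?_⟩
      intro u hu htu
      simp at hu
      omega
    · have hvxs : v ∈ xs := by
        rcases List.mem_append.mp hv with h | h
        · exact h
        · simp at h; exact absurd h hvx
      obtain ⟨t, ht, hg, hlast⟩ := ih hvxs
      by_cases hlx : pvLastOcc (xs ++ [x]) t
      · exact ⟨t, by simp; omega, by rw [List.getD_append _ _ _ _ ht]; exact hg, hlx⟩
      · exfalso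
        apply hlx
        rw [pvLastOcc_append_lt xs x t ht]
        exact ⟨hlast, by rw [hg]; exact fun h => hvx h.symm⟩

lemma pvDict_isSome (cards : List Int) (v : Int) :
    ((pvDict cards).get? v).isSome = true ↔ v ∈ cards := by
  rw [Option.isSome_iff_exists]
  constructor
  · rintro ⟨j, hj⟩
    rw [pvDict_get?L] at hj
    obtain ⟨t, ht, _, hv, _⟩ := hj
    rw [← hv, List.getD_eq_getElem _ _ ht]
    exact List.getElem_mem ht
  · intro hv
    obtain ⟨t, ht, hg, hlast⟩ := pvLast_exists cards v hv
    exact ⟨(t : Int), (pvDict_get?L cards v _).mpr ⟨t, ht, rfl, hg, hlast⟩⟩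

lemma pvDict_eq_coe (cards : List Int) (v : Int) (k : Nat) (hk : k < cards.length) :
    ((pvDict cards).get? v = some (k : Int)) ↔
      (v = cards.getD k 0 ∧ pvLastOcc cards k) := by
  rw [pvDict_get?L]
  constructor
  · rintro ⟨t, ht, hjt, hv, hlast⟩
    have : t = k := by omega
    subst this
    exact ⟨hv.symm, hlast⟩
  · rintro ⟨rfl, hlast⟩
    exact ⟨k, hk, rfl, rfl, hlast⟩

lemma pvDict_ne_coe (cards : List Int) (v : Int) (k : Nat)
    (hk : cards.length ≤ k) :
    ¬ ((pvDict cards).get? v = some (k : Int)) := by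
  rw [pvDict_get?L]
  rintro ⟨t, ht, hjt, _⟩
  omega

lemma pvCntSome (cards : List Int) (hpos : ∀ x ∈ cards, 0 < x)
    (M : Int) (hM : ∀ y ∈ cards, y ≤ M) (c : Int) (hc : c ∈ cards) :
    (pvRangeOf M c).countP (fun m => ((pvDict cards).get? m).isSome) = pvUps cards c := by
  have hc0 := hpos c hc
  rw [pvUps, List.countP_eq_length_filter, List.countP_eq_length_filter]
  apply List.Perm.length_eq
  rw [List.perm_ext_iff_of_nodup ((pvNodup_rangeOf M c hc0).filter _)
    (cards.nodup_dedup.filter _)]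
  intro x
  simp only [List.mem_filter, pvMem_rangeOf M c x hc0, pvDict_isSome cards,
    decide_eq_true_eq, PySem.Int.mod_eq_zero_iff_dvd, List.mem_dedup]
  constructor
  · rintro ⟨⟨h1, h2, h3⟩, hx⟩
    exact ⟨hx, ((pvWindow cards hpos M hM c x hc hx).mp ⟨h1, h2, h3⟩)⟩
  · rintro ⟨hx, h⟩
    exact ⟨(pvWindow cards hpos M hM c x hc hx).mpr h, hx⟩

lemma pvCntEq (cards : List Int) (hpos : ∀ x ∈ cards, 0 < x)
    (M : Int) (hM : ∀ y ∈ cards, y ≤ M) (k : Nat) (hk : k < cards.length)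
    (o : Int) (ho : o ∈ cards) :
    ((pvRangeOf M o).countP (fun m => (pvDict cards).get? m == some (k : Int)))
      = if pvIsLast cards k = true ∧ cards.getD k 0 ≠ o ∧
            PySem.Int.mod (cards.getD k 0) o = 0 then 1 else 0 := by
  have ho0 := hpos o ho
  have hckmem : cards.getD k 0 ∈ cards := by
    rw [List.getD_eq_getElem _ _ hk]; exact List.getElem_mem hk
  by_cases hlast : pvLastOcc cards k
  · have hpred : ∀ m : Int,
        ((pvDict cards).get? m == some (k : Int)) = (m == cards.getD k 0) := by
      intro m
      rw [Bool.eq_iff_iff]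
      simp only [beq_iff_eq]
      rw [pvDict_eq_coe cards m k hk]
      exact ⟨fun h => h.1, fun h => ⟨h, hlast⟩⟩
    rw [List.countP_congr (fun m _ => by rw [hpred m])]
    have hcnt : (pvRangeOf M o).countP (fun m => m == cards.getD k 0)
        = (pvRangeOf M o).count (cards.getD k 0) := by rw [List.count]
    rw [hcnt]
    by_cases hmem : cards.getD k 0 ∈ pvRangeOf M o
    · rw [List.count_eq_one_of_mem (pvNodup_rangeOf M o ho0) hmem]
      rw [pvMem_rangeOf M o _ ho0] at hmem
      rw [if_pos]
      refine ⟨(pvIsLast_iff cards k).mpr hlast, ?_⟩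
      rw [PySem.Int.mod_eq_zero_iff_dvd]
      exact (pvWindow cards hpos M hM o _ ho hckmem).mp hmem
    · rw [List.count_eq_zero.mpr hmem, if_neg]
      rintro ⟨_, hcon1, hcon2⟩
      apply hmem
      rw [pvMem_rangeOf M o _ ho0]
      rw [PySem.Int.mod_eq_zero_iff_dvd] at hcon2
      exact (pvWindow cards hpos M hM o _ ho hckmem).mpr ⟨hcon1, hcon2⟩
  · rw [if_neg (fun h => hlast ((pvIsLast_iff cards k).mp h.1)), List.countP_eq_zero]
    intro m _
    simp only [beq_iff_eq]
    rw [pvDict_eq_coe cards m k hk]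
    exact fun h => hlast h.2

lemma pvCntEq_zero (cards : List Int) (k : Nat) (hk : cards.length ≤ k) (M o : Int) :
    ((pvRangeOf M o).countP (fun m => (pvDict cards).get? m == some (k : Int))) = 0 := by
  rw [List.countP_eq_zero]
  intro m _
  simp only [beq_iff_eq]
  exact pvDict_ne_coe cards m k hk

lemma pvSum_range_indicator (F : Int → Int) (L k : Nat) :
    ((PySem.List.pyRange 0 (L : Int) 1).map
        (fun j => if j = (k : Int) then F j else 0)).sum
      = if k < L then F (k : Int) else 0 := by
  induction L with
  | zero =>
    rw [PySem.List.pyRange_one_eq_nil (by omega)]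
    simp
  | succ L ih =>
    rw [show ((L + 1 : Nat) : Int) = (L : Int) + 1 from by push_cast; ring,
      PySem.List.pyRange_one_succ_right (by omega), List.map_append, List.sum_append, ih]
    simp only [List.map_cons, List.map_nil, List.sum_cons, List.sum_nil, add_zero]
    by_cases hkL : k < L
    · rw [if_pos hkL, if_neg (show ¬((L : Int) = (k : Int)) by omega),
        if_pos (show k < L + 1 by omega)]
      ring
    · rw [if_neg hkL]
      by_cases hk : k = L
      · subst hk
        rw [if_pos rfl, if_pos (show k < k + 1 by omega)]
        ring
      · rw [if_neg (show ¬((L : Int) = (k : Int)) by omega),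
          if_neg (show ¬(k < L + 1) by omega)]
        ring

lemma pvCountP_pyRange (L : Nat) (p : Int → Bool) :
    (PySem.List.pyRange 0 (L : Int) 1).countP p
      = (List.range L).countP (fun t : Nat => p ((t : Nat) : Int)) := by
  rw [PySem.List.pyRange_one, List.countP_map]
  have h1 : ((L : Int) - 0).toNat = L := by omega
  rw [h1]
  apply List.countP_congr
  intro t _
  simp [Function.comp]

lemma pvA_getD (n : Int) (cards : List Int) (hne : cards ≠ [])
    (hpos : ∀ x ∈ cards, 0 < x) (hpre : Pre_result_after_game n cards) (k : Nat) :
    (result_after_game n cards).getD k 0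
      = if k < cards.length then pvNetAt cards k else (0 : Int) := by
  set M : Int := (PySem.List.max? cards (fun x => x)).getD 0 with hMdef
  have hMmax : ∀ y ∈ cards, y ≤ M := by
    cases hmx : PySem.List.max? cards (fun x => x) with
    | none => exact absurd ((PySem.List.max?_eq_none_iff _ _).mp hmx) hne
    | some m =>
      intro y hy
      have := PySem.List.max?_isMax hmx y hy
      rw [hMdef, hmx]
      exact this
  have hinitlen : ((PySem.List.pyRange 0 n 1).map (fun _ => (0 : Int))).length = n.toNat := by
    simp [PySem.List.length_pyRange_one]
  rw [pvA_eq_opsfold]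
  rw [pvGetD_opsfold _ _ k ?hops]
  case hops =>
    intro q hq
    rw [hinitlen]
    rw [List.mem_flatMap] at hq
    obtain ⟨p, hp, hq2⟩ := hq
    rw [List.mem_flatMap] at hq2
    obtain ⟨m, hm, hq3⟩ := hq2
    rw [PySem.List.mem_enumerate_iff] at hp
    obtain ⟨t, ht, rfl⟩ := hp
    have hct : cards.getD t 0 = cards[t] := List.getD_eq_getElem _ _ ht
    have hc0 : 0 < cards[t] := hpos _ (List.getElem_mem ht)
    -- any successful dict lookup on a visited multiple is a divisor/multiple pair
    have hpair : ∀ j', (pvDict cards).get? m = some j' →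
        ∃ t' : Nat, t' < cards.length ∧ j' = (t' : Int) ∧
          (t : Int) < n ∧ (t' : Int) < n := by
      intro j' hj'
      rw [pvDict_get?L] at hj'
      obtain ⟨t', ht', rfl, hv, hlast⟩ := hj'
      rw [pvMem_rangeOf M _ _ hc0] at hm
      obtain ⟨hm1, hm2, hm3⟩ := hm
      have hneq : cards.getD t 0 ≠ cards.getD t' 0 := by
        rw [hct, hv]
        omega
      have hmod : PySem.Int.mod (cards.getD t' 0) (cards.getD t 0) = 0 := by
        rw [hv, hct, PySem.Int.mod_eq_zero_iff_dvd]
        exact hm3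
      obtain ⟨h1, h2⟩ := hpre.2.2.2 t ht t' ht' hneq hmod
      exact ⟨t', ht', rfl, h1, h2⟩
    rcases pvOpsOf_mem _ _ _ _ hq3 with h1 | ⟨j', hj', h1⟩
    · have hex : ∃ j', (pvDict cards).get? m = some j' := by
        unfold pvOpsOf at hq3
        cases hg : (pvDict cards).get? m with
        | some j'' => exact ⟨j'', rfl⟩
        | none => rw [hg] at hq3; simp at hq3
      obtain ⟨j', hj'⟩ := hex
      obtain ⟨t', ht', rfl, hn1, hn2⟩ := hpair j' hj'
      subst h1
      refine ⟨by simp, ?_⟩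
      simp only [zero_add, Int.toNat_natCast]
      omega
    · obtain ⟨t', ht', rfl, hn1, hn2⟩ := hpair _ hj'
      subst h1
      refine ⟨by simp, ?_⟩
      simp only [Int.toNat_natCast]
      omega
  have hinit : ((PySem.List.pyRange 0 n 1).map (fun _ => (0 : Int))).getD k 0 = 0 := by
    rcases Nat.lt_or_ge k n.toNat with hk | hk
    · rw [List.getD_eq_getElem _ _ (by rw [hinitlen]; omega)]
      simp
    · rw [List.getD_eq_getElem?_getD, List.getElem?_eq_none (by rw [hinitlen]; omega)]
      rfl
  rw [hinit, List.map_flatMap, pvSum_flatMap]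
  rw [List.map_congr_left (fun p _ => pvInner_sum cards M k p.1 p.2)]
  rw [List.map_congr_left (fun (p : Int × Int) _ => sub_eq_add_neg _ _)]
  rw [PySem.List.sum_map_add_int]
  have hX := pvSum_enum_indicator
    (fun c => ((pvRangeOf M c).countP (fun m => ((pvDict cards).get? m).isSome) : Int))
    cards 0 k
  simp only [Nat.cast_zero, Nat.zero_add, Nat.sub_zero, Nat.zero_le, true_and,
    zero_add] at hX
  rw [hX, pvSum_map_neg, pvMap_snd
    (fun c => ((pvRangeOf M c).countP (fun m => (pvDict cards).get? m == some (k : Int)) : Int))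
    cards 0]
  by_cases hk : k < cards.length
  · rw [if_pos hk, if_pos hk]
    have hck : cards.getD k 0 = cards[k] := List.getD_eq_getElem _ _ hk
    have hmem : cards.getD k 0 ∈ cards := by rw [hck]; exact List.getElem_mem hk
    rw [pvCntSome cards hpos M hMmax _ hmem]
    by_cases hlast : pvIsLast cards k = true
    · have hY : cards.map
          (fun c => ((pvRangeOf M c).countP
            (fun m => (pvDict cards).get? m == some (k : Int)) : Int))
          = cards.map (fun o => if o ≠ cards.getD k 0 ∧
              PySem.Int.mod (cards.getD k 0) o = 0 then (1 : Int) else 0) := by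
        apply List.map_congr_left
        intro o ho
        rw [pvCntEq cards hpos M hMmax k hk o ho]
        by_cases h : cards.getD k 0 ≠ o ∧ PySem.Int.mod (cards.getD k 0) o = 0
        · rw [if_pos ⟨hlast, h⟩, if_pos ⟨Ne.symm h.1, h.2⟩]
          simp
        · rw [if_neg (fun hc => h hc.2), if_neg (fun hc => h ⟨Ne.symm hc.1, hc.2⟩)]
          simp
      rw [hY, pvSum_ite_prop]
      rw [pvNetAt, pvUps, pvDowns, if_pos hlast]
      ring
    · have hY : cards.map
          (fun c => ((pvRangeOf M c).countP
            (fun m => (pvDict cards).get? m == some (k : Int)) : Int))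
          = cards.map (fun _ => (0 : Int)) := by
        apply List.map_congr_left
        intro o ho
        rw [pvCntEq cards hpos M hMmax k hk o ho]
        rw [if_neg (fun hc => hlast hc.1)]
        rfl
      rw [hY]
      rw [pvNetAt, pvUps, if_neg hlast]
      simp
  · rw [if_neg hk, if_neg hk]
    have hY : cards.map
        (fun c => ((pvRangeOf M c).countP
          (fun m => (pvDict cards).get? m == some (k : Int)) : Int))
        = cards.map (fun _ => (0 : Int)) := by
      apply List.map_congr_left
      intro o _
      rw [pvCntEq_zero cards k (by omega) M o]
      rfl
    rw [hY]
    simp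

-- ===== B-side =====

-- B's per-pair hit test as a Bool
def pvHitB (cards : List Int) (i j : Int) : Bool :=
  decide (PySem.List.pyGetD cards i 0 ≠ PySem.List.pyGetD cards j 0 ∧
    PySem.Int.mod (PySem.List.pyGetD cards j 0) (PySem.List.pyGetD cards i 0) = 0)

def pvOpsB (cards : List Int) (i : Int) : List (Int × Int) :=
  (PySem.List.pyRange 0 (PySem.List.len cards) 1).flatMap (fun j =>
    if pvHitB cards i j = true then [(i, 1), (j, -1)] else [])

lemma pvB_eq_opsfold (n : Int) (cards : List Int) :
    result_after_game_alt n cards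
      = ((PySem.List.pyRange 0 (PySem.List.len cards) 1).flatMap (pvOpsB cards)).foldl
          pvStep (List.replicate n.toNat 0) := by
  rw [List.foldl_flatMap]
  simp only [result_after_game_alt]
  apply PySem.List.foldl_congr_mem
  intro acc i _
  unfold pvOpsB
  rw [List.foldl_flatMap]
  apply PySem.List.foldl_congr_mem
  intro acc2 j _
  by_cases hh : PySem.List.pyGetD cards i 0 ≠ PySem.List.pyGetD cards j 0 ∧
      PySem.Int.mod (PySem.List.pyGetD cards j 0) (PySem.List.pyGetD cards i 0) = 0
  · rw [if_pos hh, if_pos (by rw [pvHitB]; exact decide_eq_true hh)]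
    rfl
  · rw [if_neg hh, if_neg (by rw [pvHitB]; simp only [decide_eq_true_eq]; exact hh)]
    rfl

lemma pvOpsB_sum (cards : List Int) (i : Int) (k : Nat) :
    ((pvOpsB cards i).map (fun q => if q.1 = (k : Int) then q.2 else 0)).sum
      = (if i = (k : Int)
          then ((PySem.List.pyRange 0 (PySem.List.len cards) 1).countP
              (fun j => pvHitB cards i j) : Int)
          else 0)
        - (if k < cards.length
            then (if pvHitB cards i (k : Int) = true then (1 : Int) else 0) else 0) := by
  unfold pvOpsB
  rw [List.map_flatMap, pvSum_flatMap]
  have hper : ∀ j, ((if pvHitB cards i j = true then [(i, (1 : Int)), (j, -1)] else []).map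
        (fun q => if q.1 = (k : Int) then q.2 else 0)).sum
      = (if i = (k : Int) then (if pvHitB cards i j = true then (1 : Int) else 0) else 0)
        + (if j = (k : Int) then (if pvHitB cards i j = true then (-1 : Int) else 0) else 0) := by
    intro j
    by_cases hh : pvHitB cards i j = true
    · rw [if_pos hh]
      simp only [List.map_cons, List.map_nil, List.sum_cons, List.sum_nil, add_zero,
        if_pos hh]
    · simp [hh]
  rw [List.map_congr_left (fun j _ => hper j), PySem.List.sum_map_add_int, sub_eq_add_neg]
  congr 1
  · by_cases hik : i = (k : Int)
    · rw [if_pos hik]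
      simp only [if_pos hik]
      exact PySem.List.sum_map_ite_one_zero _ _
    · rw [if_neg hik]
      simp [hik]
  · rw [show PySem.List.len cards = ((cards.length : Nat) : Int) from rfl,
      pvSum_range_indicator (fun j => if pvHitB cards i j = true then (-1 : Int) else 0)
        cards.length k]
    by_cases hkL : k < cards.length
    · rw [if_pos hkL, if_pos hkL]
      by_cases hh : pvHitB cards i (k : Int) = true <;> simp [hh]
    · rw [if_neg hkL, if_neg hkL]
      ring

lemma pvB_length (n : Int) (cards : List Int) :
    (result_after_game_alt n cards).length = n.toNat := by
  rw [pvB_eq_opsfold, pvLength_opsfold]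
  simp

lemma pvMap_range_getD (xs : List Int) :
    (List.range xs.length).map (fun t => xs.getD t 0) = xs := by
  apply List.ext_getElem
  · simp
  · intro i h1 h2
    simp only [List.getElem_map, List.getElem_range]
    rw [List.getD_eq_getElem _ _ h2]

lemma pvCountP_range_getD (xs : List Int) (p : Int → Bool) :
    (List.range xs.length).countP (fun t => p (xs.getD t 0)) = xs.countP p := by
  conv_rhs => rw [← pvMap_range_getD xs]
  rw [List.countP_map]
  rfl

lemma pvGetD_cast (cards : List Int) (t : Nat) :
    PySem.List.pyGetD cards ((t : Nat) : Int) 0 = cards.getD t 0 := by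
  rw [PySem.List.pyGetD_of_nonneg _ _ (by omega)]
  simp

lemma pvB_getD (n : Int) (cards : List Int)
    (hpre : Pre_result_after_game n cards) (k : Nat) :
    (result_after_game_alt n cards).getD k 0
      = if k < cards.length then
          ((cards.countP (fun v => decide (cards.getD k 0 ≠ v ∧
              PySem.Int.mod v (cards.getD k 0) = 0)) : Int)
            - (cards.countP (fun o => decide (o ≠ cards.getD k 0 ∧
                PySem.Int.mod (cards.getD k 0) o = 0)) : Int))
        else 0 := by
  have hlenI : PySem.List.len cards = ((cards.length : Nat) : Int) := rfl
  rw [pvB_eq_opsfold]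
  rw [pvGetD_opsfold _ _ k ?hops]
  case hops =>
    intro q hq
    rw [List.length_replicate]
    rw [List.mem_flatMap] at hq
    obtain ⟨i, hi, hq2⟩ := hq
    rw [hlenI, PySem.List.mem_pyRange_one] at hi
    have hiL : i.toNat < cards.length := by omega
    unfold pvOpsB at hq2
    rw [List.mem_flatMap] at hq2
    obtain ⟨j, hj, hq3⟩ := hq2
    rw [hlenI, PySem.List.mem_pyRange_one] at hj
    have hjL : j.toNat < cards.length := by omega
    have hhit : pvHitB cards i j = true := by
      by_cases hh : pvHitB cards i j = true
      · exact hh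
      · rw [if_neg hh] at hq3; simp at hq3
    rw [if_pos hhit] at hq3
    have hin : i = ((i.toNat : Nat) : Int) := by omega
    have hjn : j = ((j.toNat : Nat) : Int) := by omega
    rw [pvHitB, hin, hjn, pvGetD_cast, pvGetD_cast, decide_eq_true_eq] at hhit
    obtain ⟨hb1, hb2⟩ := hpre.2.2.2 i.toNat hiL j.toNat hjL hhit.1 hhit.2
    simp only [List.mem_cons, List.not_mem_nil, or_false] at hq3
    rcases hq3 with h1 | h1
    · subst h1
      exact ⟨by omega, by omega⟩
    · subst h1
      exact ⟨by omega, by omega⟩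
  have hinit : (List.replicate n.toNat (0 : Int)).getD k 0 = 0 := by
    rcases Nat.lt_or_ge k n.toNat with hk | hk
    · rw [List.getD_replicate _ hk]
    · rw [List.getD_eq_getElem?_getD,
        List.getElem?_eq_none (by rw [List.length_replicate]; omega)]
      rfl
  rw [hinit, List.map_flatMap, pvSum_flatMap]
  rw [List.map_congr_left (fun i _ => pvOpsB_sum cards i k)]
  rw [List.map_congr_left (fun (i : Int) _ => sub_eq_add_neg _ _)]
  rw [PySem.List.sum_map_add_int]
  -- the i = k part: count of j hit by k
  rw [hlenI, pvSum_range_indicator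
    (fun i => ((PySem.List.pyRange 0 ((cards.length : Nat) : Int) 1).countP
        (fun j => pvHitB cards i j) : Int)) cards.length k]
  -- the j = k part: count of i hitting k
  rw [pvSum_map_neg]
  have hYcongr : (List.map (fun i =>
      (if k < cards.length
        then (if pvHitB cards i (k : Int) = true then (1 : Int) else 0) else 0))
      (PySem.List.pyRange 0 ((cards.length : Nat) : Int) 1)).sum
      = if k < cards.length
          then ((PySem.List.pyRange 0 ((cards.length : Nat) : Int) 1).countP
              (fun i => pvHitB cards i (k : Int)) : Int)
          else 0 := by
    by_cases hkL : k < cards.length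
    · rw [if_pos hkL]
      rw [List.map_congr_left (fun i (_ : i ∈ _) => if_pos hkL)]
      exact PySem.List.sum_map_ite_one_zero _ _
    · rw [if_neg hkL]
      rw [List.map_congr_left (fun i (_ : i ∈ _) => if_neg hkL)]
      simp
  rw [hYcongr]
  by_cases hkL : k < cards.length
  · rw [if_pos hkL, if_pos hkL, if_pos hkL]
    -- ups: count over index j of hit k j = count over values of proper multiples
    have hups : (PySem.List.pyRange 0 ((cards.length : Nat) : Int) 1).countP
        (fun j => pvHitB cards (k : Int) j)
        = cards.countP (fun v => decide (cards.getD k 0 ≠ v ∧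
            PySem.Int.mod v (cards.getD k 0) = 0)) := by
      rw [pvCountP_pyRange]
      have hfun : (fun t : Nat => pvHitB cards ((k : Nat) : Int) ((t : Nat) : Int))
          = fun t : Nat => (fun v => decide (cards.getD k 0 ≠ v ∧
              PySem.Int.mod v (cards.getD k 0) = 0)) (cards.getD t 0) := by
        funext t
        rw [pvHitB, pvGetD_cast cards k, pvGetD_cast cards t]
      rw [hfun]
      exact pvCountP_range_getD cards (fun v => decide (cards.getD k 0 ≠ v ∧
        PySem.Int.mod v (cards.getD k 0) = 0))
    -- downs: count over index i of hit i k = count over values of proper divisors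
    have hdowns : (PySem.List.pyRange 0 ((cards.length : Nat) : Int) 1).countP
        (fun i => pvHitB cards i (k : Int))
        = cards.countP (fun o => decide (o ≠ cards.getD k 0 ∧
            PySem.Int.mod (cards.getD k 0) o = 0)) := by
      rw [pvCountP_pyRange]
      have hfun : (fun t : Nat => pvHitB cards ((t : Nat) : Int) ((k : Nat) : Int))
          = fun t : Nat => (fun o => decide (o ≠ cards.getD k 0 ∧
              PySem.Int.mod (cards.getD k 0) o = 0)) (cards.getD t 0) := by
        funext t
        rw [pvHitB, pvGetD_cast cards k, pvGetD_cast cards t]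
      rw [hfun]
      exact pvCountP_range_getD cards (fun o => decide (o ≠ cards.getD k 0 ∧
        PySem.Int.mod (cards.getD k 0) o = 0))
    rw [hups, hdowns]
    ring
  · rw [if_neg hkL, if_neg hkL, if_neg hkL]
    ring

-- a predicate met only by values occurring once counts the same on dedup and the list
lemma pvNodup_filter_of_unique (cards : List Int) (p : Int → Bool)
    (h : ∀ x ∈ cards, p x = true → cards.count x ≤ 1) : (cards.filter p).Nodup := by
  rw [List.nodup_iff_count_le_one]
  intro a
  by_cases hpa : p a = true
  · rw [List.count_filter hpa]
    by_cases hmem : a ∈ cards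
    · exact h a hmem hpa
    · rw [List.count_eq_zero.mpr hmem]
      exact Nat.zero_le 1
  · rw [List.count_eq_zero.mpr (fun hmem => hpa (List.mem_filter.mp hmem).2)]
    exact Nat.zero_le 1

lemma pvCountP_dedup_of_unique (cards : List Int) (p : Int → Bool)
    (h : ∀ x ∈ cards, p x = true → cards.count x ≤ 1) :
    cards.dedup.countP p = cards.countP p := by
  rw [List.countP_eq_length_filter, List.countP_eq_length_filter]
  apply List.Perm.length_eq
  rw [List.perm_ext_iff_of_nodup (cards.nodup_dedup.filter p)
    (pvNodup_filter_of_unique cards p h)]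
  intro x
  simp [List.mem_filter, List.mem_dedup]

lemma pvTwo_le_countP (l : List Nat) (p : Nat → Bool) (a b : Nat)
    (hnd : l.Nodup) (ha : a ∈ l) (hb : b ∈ l) (hab : a ≠ b)
    (hpa : p a = true) (hpb : p b = true) : 2 ≤ l.countP p := by
  rw [List.countP_eq_length_filter]
  have ha' : a ∈ l.filter p := List.mem_filter.mpr ⟨ha, hpa⟩
  have hb' : b ∈ l.filter p := List.mem_filter.mpr ⟨hb, hpb⟩
  match hl : l.filter p with
  | [] => rw [hl] at ha'; simp at ha'
  | [x] =>
    rw [hl] at ha' hb'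
    simp only [List.mem_singleton] at ha' hb'
    exact absurd (ha'.trans hb'.symm) hab
  | x :: y :: t => simp [hl]

lemma pvCount_two (cards : List Int) (u w : Nat) (hu : u < cards.length)
    (hw : w < cards.length) (hne : u ≠ w) (heq : cards.getD u 0 = cards.getD w 0) :
    1 < cards.count (cards.getD w 0) := by
  rw [List.count_eq_countP,
    ← pvCountP_range_getD cards (fun x => x == cards.getD w 0)]
  exact pvTwo_le_countP (List.range cards.length) _ u w List.nodup_range
    (List.mem_range.mpr hu) (List.mem_range.mpr hw) hne
    (by simp only [beq_iff_eq]; exact heq) (by simp)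

-- ===== VERDICT (by name: the statement is the Claim_ definition above) =====
theorem result_after_game_spec : Claim_equal_result_after_game := by
  intro n cards hdom hpre
  unfold Spec_result_after_game
  apply List.ext_getElem
  · rw [pvA_length, pvB_length]
  · intro k h1 h2
    rw [← List.getD_eq_getElem (result_after_game n cards) 0 h1,
      ← List.getD_eq_getElem (result_after_game_alt n cards) 0 h2,
      pvA_getD n cards hpre.1 hpre.2.1 hpre k, pvB_getD n cards hpre k]
    by_cases hkL : k < cards.length
    · rw [if_pos hkL, if_pos hkL]
      have hckmem : cards.getD k 0 ∈ cards := by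
        rw [List.getD_eq_getElem _ _ hkL]
        exact List.getElem_mem hkL
      have hu : ∀ x ∈ cards,
          (fun v => decide (v ≠ cards.getD k 0 ∧
            PySem.Int.mod v (cards.getD k 0) = 0)) x = true → cards.count x ≤ 1 := by
        intro x hx hpx
        simp only [decide_eq_true_eq] at hpx
        by_contra hcnt
        rcases hpre.2.2.1 x hx (by omega) (cards.getD k 0) hckmem with h | h
        · exact hpx.1 h.symm
        · exact h hpx.2
      have hUps : (pvUps cards (cards.getD k 0) : Nat)
          = cards.countP (fun v => decide (cards.getD k 0 ≠ v ∧
              PySem.Int.mod v (cards.getD k 0) = 0)) := by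
        rw [pvUps, pvCountP_dedup_of_unique cards _ hu]
        apply List.countP_congr
        intro v _
        simp only [decide_eq_true_eq]
        exact ⟨fun h => ⟨Ne.symm h.1, h.2⟩, fun h => ⟨Ne.symm h.1, h.2⟩⟩
      rw [pvNetAt, hUps]
      by_cases hlast : pvIsLast cards k = true
      · rw [if_pos hlast]
        rfl
      · rw [if_neg hlast]
        have hnl : ¬ pvLastOcc cards k := fun hh => hlast ((pvIsLast_iff cards k).mpr hh)
        unfold pvLastOcc at hnl
        push_neg at hnl
        obtain ⟨u, hu', hku, heq⟩ := hnl
        have hcnt : 1 < cards.count (cards.getD k 0) :=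
          pvCount_two cards u k hu' hkL (by omega) heq
        have hD : cards.countP (fun o => decide (o ≠ cards.getD k 0 ∧
            PySem.Int.mod (cards.getD k 0) o = 0)) = 0 := by
          by_contra hh
          obtain ⟨o, ho, hpo⟩ := List.countP_pos_iff.mp (Nat.pos_of_ne_zero hh)
          simp only [decide_eq_true_eq] at hpo
          rcases hpre.2.2.1 (cards.getD k 0) hckmem hcnt o ho with h | h
          · exact hpo.1 h
          · exact h hpo.2
        rw [hD]
        simp
    · rw [if_neg hkL, if_neg hkL]
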